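-- pv_equiv track=rewrite | github.com/MrBrantCode/unitest_baseline | mut_generate/mist_train_cf/cf_88849/solution.py | get_second_to_last_prime
-- ===== SOURCE A (Python) =====
-- import math
--
-- def get_second_to_last_prime(numbers):
--     def is_prime(n):
--         if n <= 1:
--             return False
--         for i in range(2, int(math.sqrt(n)) + 1):
--             if n % i == 0:
--                 return False
--         return True
--
--     prime_count = 0
--     second_to_last_prime = None
--
--     for num in reversed(numbers):
--         if is_prime(num):
--             prime_count += 1
--             if prime_count == 2:
--                 second_to_last_prime = num
--                 break
--
--     return second_to_last_prime
-- ===== SOURCE B (Python) =====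
-- import math
--
-- def get_second_to_last_prime(numbers):
--     def is_prime(n):
--         if n <= 1:
--             return False
--         for i in range(2, int(math.sqrt(n)) + 1):
--             if n % i == 0:
--                 return False
--         return True
--
--     primes = [n for n in numbers if is_prime(n)]
--     return primes[-2] if len(primes) >= 2 else None
-- ===== Notes on version B (the rewrite author's own statement) =====
-- stated objective: simpler
-- what changed: B collects all primes in forward order with a filter and returns the second-from-the-end prime by a negative index, replacing A's reversed scan with a running counter and early break.
import Mathlib
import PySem

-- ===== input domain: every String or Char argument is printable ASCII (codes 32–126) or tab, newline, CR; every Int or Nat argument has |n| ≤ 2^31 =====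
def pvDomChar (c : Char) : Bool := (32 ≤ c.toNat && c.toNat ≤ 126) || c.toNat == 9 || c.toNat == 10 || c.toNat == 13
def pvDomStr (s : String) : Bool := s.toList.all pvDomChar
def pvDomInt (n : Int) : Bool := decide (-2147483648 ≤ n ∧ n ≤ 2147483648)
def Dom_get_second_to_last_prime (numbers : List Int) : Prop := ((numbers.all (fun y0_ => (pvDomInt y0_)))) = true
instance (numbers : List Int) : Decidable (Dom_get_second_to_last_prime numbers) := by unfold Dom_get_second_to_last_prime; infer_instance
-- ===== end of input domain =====

-- B replaces A's reversed scan with counter and break by a forward prime filter plus a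
-- negative-index lookup (objective: simpler). Return-value equivalence only; neither mutates.

-- ===== PORT A =====
-- shared helper is_prime (byte-identical in Source A and Source B).
-- int(math.sqrt(n)) is ported as Nat.sqrt n.toNat, exact for 0 ≤ n ≤ 2^31 (the stated domain).
def pyIsPrime (n : Int) : Bool :=
  if n ≤ 1 then false
  else (PySem.List.pyRange 2 ((Nat.sqrt n.toNat : Int) + 1) 1).all
        (fun i => !(PySem.Int.mod n i == 0))

-- the 'for num in reversed(numbers)' loop with prime_count and break
def pvALoop (xs : List Int) (c : Nat) : Option Int :=
  match xs with
  | [] => none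
  | n :: rest =>
    if pyIsPrime n then
      (if c + 1 == 2 then some n else pvALoop rest (c + 1))
    else pvALoop rest c

def get_second_to_last_prime (numbers : List Int) : Option Int :=
  pvALoop numbers.reverse 0

-- ===== PORT B =====
def get_second_to_last_prime_alt (numbers : List Int) : Option Int :=
  let primes := numbers.filter pyIsPrime
  if 2 ≤ primes.length then PySem.List.pyGet? primes (-2) else none

-- ===== PRECONDITION & SPEC =====
def Spec_get_second_to_last_prime (numbers : List Int) (out : Option Int) : Prop := out = get_second_to_last_prime_alt numbers
instance (numbers : List Int) (out : Option Int) : Decidable (Spec_get_second_to_last_prime numbers out) := by unfold Spec_get_second_to_last_prime; infer_instance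

-- ===== CLAIM (what is proved, stated in full; the proofs are below) =====
def Claim_equal_get_second_to_last_prime : Prop := ∀ (numbers : List Int), Dom_get_second_to_last_prime numbers → Spec_get_second_to_last_prime numbers (get_second_to_last_prime numbers)

-- ===== LEMMAS AND PROOFS =====

-- once one prime has been seen, the loop returns the next prime encountered
theorem pvALoop_one (xs : List Int) : pvALoop xs 1 = (xs.filter pyIsPrime).head? := by
  induction xs with
  | nil => rfl
  | cons x rest ih =>
    by_cases h : pyIsPrime x = true <;> simp [pvALoop, h, ih]

-- from count 0, the loop returns the second prime encountered
theorem pvALoop_zero (xs : List Int) : pvALoop xs 0 = (xs.filter pyIsPrime)[1]? := by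
  induction xs with
  | nil => rfl
  | cons x rest ih =>
    by_cases h : pyIsPrime x = true <;>
      simp [pvALoop, h, pvALoop_one, ih, List.head?_eq_getElem?]

-- ===== VERDICT (by name: the statement is the Claim_ definition above) =====
theorem get_second_to_last_prime_spec : Claim_equal_get_second_to_last_prime := by
  intro numbers _
  unfold Spec_get_second_to_last_prime get_second_to_last_prime get_second_to_last_prime_alt
  rw [pvALoop_zero, List.filter_reverse]
  set ps := numbers.filter pyIsPrime with hps
  by_cases h : 2 ≤ ps.length
  · simp only [h, if_pos]
    rw [PySem.List.pyGet?_neg_ofNat ps 2 (by omega) h,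
        List.getElem?_reverse (by omega)]
    congr 1
  · simp only [h, if_false]
    rw [List.getElem?_eq_none]
    simp only [List.length_reverse]
    omega
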